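-- pv_equiv track=rewrite | github.com/Violetta147/DDoS | tmp/check_model_features.py | _resolve_aliases
-- ===== SOURCE A (Python) =====
-- def _resolve_aliases_once(cols: set[str], aliases: dict[str, str]) -> tuple[set[str], bool]:
--     created_any = False
--     next_cols = set(cols)
--     for expected, actual in aliases.items():
--         if expected not in next_cols and actual in next_cols:
--             next_cols.add(expected)
--             created_any = True
--     return next_cols, created_any
--
-- def _resolve_aliases(cols: set[str], aliases: dict[str, str]) -> set[str]:
--     current = set(cols)
--     max_passes = max(len(aliases), 1)
--     for _ in range(max_passes):
--         current, changed = _resolve_aliases_once(current, aliases)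
--         if not changed:
--             return current
--     return current
-- ===== SOURCE B (Python) =====
-- def _resolve_aliases(cols: set[str], aliases: dict[str, str]) -> set[str]:
--     result = set(cols)
--     pending = [(e, a) for e, a in aliases.items() if e not in result]
--     while True:
--         rest = []
--         for e, a in pending:
--             if a in result:
--                 result.add(e)
--             else:
--                 rest.append((e, a))
--         if len(rest) == len(pending):
--             return result
--         pending = rest
-- ===== Notes on version B (the rewrite author's own statement) =====
-- stated objective: alternative
-- what changed: B keeps a shrinking worklist of still-unresolved aliases and repeatedly sweeps only that worklist until a sweep resolves nothing, instead of A's fuel-capped loop that rescans the entire alias dict every pass with a changed flag.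
import Mathlib
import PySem

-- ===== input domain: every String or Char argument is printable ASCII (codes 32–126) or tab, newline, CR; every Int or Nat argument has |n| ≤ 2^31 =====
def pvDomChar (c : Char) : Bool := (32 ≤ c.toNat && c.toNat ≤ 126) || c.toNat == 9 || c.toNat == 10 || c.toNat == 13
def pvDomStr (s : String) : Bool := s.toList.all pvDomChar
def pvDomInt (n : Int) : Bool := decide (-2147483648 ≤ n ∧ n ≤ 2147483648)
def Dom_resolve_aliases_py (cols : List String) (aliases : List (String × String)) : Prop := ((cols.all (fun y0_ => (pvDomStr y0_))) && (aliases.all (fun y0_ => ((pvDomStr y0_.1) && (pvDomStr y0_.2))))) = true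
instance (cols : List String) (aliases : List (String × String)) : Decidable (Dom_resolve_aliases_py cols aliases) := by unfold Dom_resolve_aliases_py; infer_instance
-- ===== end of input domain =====

-- B replaces A's fuel-capped repeated full rescan of the alias dict by a recursive sweep over a
-- shrinking worklist of the still-unresolved aliases (alternative decomposition, same result).

-- ===== PORT A =====
-- one iteration step of the 'for expected, actual in aliases.items()' loop of _resolve_aliases_once
def stepA (st : List String × Bool) (ea : String × String) : List String × Bool :=
  if !(PySem.Set.contains st.1 ea.1) && PySem.Set.contains st.1 ea.2 then
    (PySem.Set.add st.1 ea.1, true)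
  else st

-- _resolve_aliases_once
def resolve_aliases_once_py (cols : List String) (aliases : List (String × String)) : List String × Bool :=
  aliases.foldl stepA (PySem.Set.ofList cols, false)

-- the 'for _ in range(max_passes)' loop of _resolve_aliases, with early return on 'not changed'
def resolveLoopA (aliases : List (String × String)) : Nat → List String → List String
  | 0, current => current
  | n + 1, current =>
    let res := resolve_aliases_once_py current aliases
    if res.2 then resolveLoopA aliases n res.1 else res.1

def resolve_aliases_py (cols : List String) (aliases : List (String × String)) : List String :=
  resolveLoopA aliases (max aliases.length 1) (PySem.Set.ofList cols)

-- ===== PORT B =====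
-- one sweep over the pending worklist: fire aliases whose source is present, keep the rest
def sweepB (result : List String) : List (String × String) → List String × List (String × String)
  | [] => (result, [])
  | ea :: rest =>
    if PySem.Set.contains result ea.2 then
      sweepB (PySem.Set.add result ea.1) rest
    else
      let rp := sweepB result rest
      (rp.1, ea :: rp.2)

-- termination measure for the recursive sweep loop (cited by resolveLoopB's decreasing_by)
theorem sweepB_len (result : List String) (pending : List (String × String)) :
    (sweepB result pending).2.length ≤ pending.length := by
  induction pending generalizing result with
  | nil => simp [sweepB]
  | cons ea rest ih =>
    simp only [sweepB]
    split
    · exact Nat.le_succ_of_le (ih _)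
    · simpa using Nat.succ_le_succ (ih result)

-- Source B's 'while True' worklist loop: sweep once, stop when nothing was resolved
def resolveLoopB (result : List String) (pending : List (String × String)) : List String :=
  if _h : (sweepB result pending).2.length = pending.length then (sweepB result pending).1
  else resolveLoopB (sweepB result pending).1 (sweepB result pending).2
termination_by pending.length
decreasing_by exact lt_of_le_of_ne (sweepB_len result pending) _h

def resolve_aliases_py_alt (cols : List String) (aliases : List (String × String)) : List String :=
  let result := PySem.Set.ofList cols
  resolveLoopB result (aliases.filter (fun ea => !(PySem.Set.contains result ea.1)))

-- ===== PRECONDITION & SPEC =====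
-- Pre_ is the representation invariant of the Python 'dict[str, str]' argument: its keys are
-- distinct (an association list with duplicate keys does not correspond to any Python dict value,
-- so A is never run on one).
def Pre_resolve_aliases_py (cols : List String) (aliases : List (String × String)) : Prop :=
  (aliases.map Prod.fst).Nodup
instance (cols : List String) (aliases : List (String × String)) : Decidable (Pre_resolve_aliases_py cols aliases) := by unfold Pre_resolve_aliases_py; infer_instance

def pvWitness_resolve_aliases_py : List String × (List (String × String)) :=
  (["a"], [("b", "a"), ("c", "b")])

def Spec_resolve_aliases_py (cols : List String) (aliases : List (String × String)) (out : List String) : Prop := out = resolve_aliases_py_alt cols aliases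
instance (cols : List String) (aliases : List (String × String)) (out : List String) : Decidable (Spec_resolve_aliases_py cols aliases out) := by unfold Spec_resolve_aliases_py; infer_instance

-- ===== CLAIM (what is proved, stated in full; the proofs are below) =====
def Claim_equal_resolve_aliases_py : Prop := ∀ (cols : List String) (aliases : List (String × String)), Dom_resolve_aliases_py cols aliases → Pre_resolve_aliases_py cols aliases → Spec_resolve_aliases_py cols aliases (resolve_aliases_py cols aliases)

-- ===== LEMMAS AND PROOFS =====

-- characterisation of one sweep: the start set is preserved, only pending keys get added, the
-- surviving worklist is exactly the pending entries whose key is still absent, and distinctness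
-- is preserved
theorem sweepB_spec (p : List (String × String)) (s : List String)
    (hs : s.Nodup) (hk : (p.map Prod.fst).Nodup) (hd : ∀ ea ∈ p, ea.1 ∉ s) :
    (∀ x ∈ s, x ∈ (sweepB s p).1) ∧
    (∀ x ∈ (sweepB s p).1, x ∈ s ∨ ∃ ea ∈ p, x = ea.1) ∧
    (sweepB s p).2 = p.filter (fun ea => !(PySem.Set.contains (sweepB s p).1 ea.1)) ∧
    (sweepB s p).1.Nodup := by
  induction p generalizing s with
  | nil =>
    refine ⟨fun x hx => hx, fun x hx => Or.inl hx, ?_, hs⟩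
    simp [sweepB]
  | cons ea rest ih =>
    simp only [List.map_cons, List.nodup_cons, List.mem_map] at hk
    obtain ⟨hk1, hk2⟩ := hk
    have hd1 : ea.1 ∉ s := hd ea (List.mem_cons_self ..)
    have hdrest : ∀ ea' ∈ rest, ea'.1 ∉ s := fun ea' h => hd ea' (List.mem_cons_of_mem _ h)
    simp only [sweepB]
    by_cases hc : PySem.Set.contains s ea.2 = true
    · simp only [hc, if_pos]
      have hs' : (PySem.Set.add s ea.1).Nodup := PySem.Set.nodup_add _ _ hs
      have hdrest' : ∀ ea' ∈ rest, ea'.1 ∉ PySem.Set.add s ea.1 := by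
        intro ea' h hmem
        rcases (PySem.Set.mem_add _ _ _).1 hmem with h1 | h1
        · exact hdrest ea' h h1
        · exact hk1 ⟨ea', h, h1⟩
      obtain ⟨ih1, ih2, ih3, ih4⟩ := ih (PySem.Set.add s ea.1) hs' hk2 hdrest'
      have hsub : ∀ x ∈ s, x ∈ (sweepB (PySem.Set.add s ea.1) rest).1 := by
        intro x hx; exact ih1 x ((PySem.Set.mem_add _ _ _).2 (Or.inl hx))
      refine ⟨hsub, ?_, ?_, ih4⟩
      · intro x hx
        rcases ih2 x hx with h1 | h1
        · rcases (PySem.Set.mem_add _ _ _).1 h1 with h2 | h2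
          · exact Or.inl h2
          · exact Or.inr ⟨ea, List.mem_cons_self .., h2⟩
        · obtain ⟨ea', h', he⟩ := h1
          exact Or.inr ⟨ea', List.mem_cons_of_mem _ h', he⟩
      · have hein : ea.1 ∈ (sweepB (PySem.Set.add s ea.1) rest).1 :=
          ih1 ea.1 ((PySem.Set.mem_add _ _ _).2 (Or.inr rfl))
        have : PySem.Set.contains (sweepB (PySem.Set.add s ea.1) rest).1 ea.1 = true :=
          (PySem.Set.contains_iff _ _).2 hein
        simp [List.filter_cons, ih3]
        exact hein
    · simp only [hc, if_neg, Bool.false_eq_true, not_false_iff]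
      obtain ⟨ih1, ih2, ih3, ih4⟩ := ih s hs hk2 hdrest
      have hnot : ea.1 ∉ (sweepB s rest).1 := by
        intro hx
        rcases ih2 ea.1 hx with h1 | h1
        · exact hd1 h1
        · obtain ⟨ea', h', he⟩ := h1
          exact hk1 ⟨ea', h', he.symm⟩
      refine ⟨ih1, ?_, ?_, ih4⟩
      · intro x hx
        rcases ih2 x hx with h1 | h1
        · exact Or.inl h1
        · obtain ⟨ea', h', he⟩ := h1
          exact Or.inr ⟨ea', List.mem_cons_of_mem _ h', he⟩
      · simp [List.filter_cons, ih3]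
        exact hnot

theorem pvBeqSucc (m n : Nat) : ((m + 1 : Nat) == (n + 1)) = (m == n) := by
  simp

-- one pass of A's fold over the full alias list equals one sweep of B over the pending sublist,
-- and A's changed flag is true exactly when the worklist shrank
theorem foldA_sweepB (l : List (String × String)) (s : List String) (b : Bool)
    (hs : s.Nodup) (hk : (l.map Prod.fst).Nodup) :
    l.foldl stepA (s, b) =
      ((sweepB s (l.filter (fun ea => !(PySem.Set.contains s ea.1)))).1,
       b || !((sweepB s (l.filter (fun ea => !(PySem.Set.contains s ea.1)))).2.length
              == (l.filter (fun ea => !(PySem.Set.contains s ea.1))).length)) := by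
  induction l generalizing s b with
  | nil => simp [sweepB]
  | cons ea t ih =>
    simp only [List.map_cons, List.nodup_cons, List.mem_map] at hk
    obtain ⟨hk1, hk2⟩ := hk
    by_cases hmem : ea.1 ∈ s
    · have hc1 : PySem.Set.contains s ea.1 = true := (PySem.Set.contains_iff _ _).2 hmem
      simp only [List.foldl_cons, List.filter_cons, hc1, Bool.not_true, Bool.false_and,
        Bool.false_eq_true, if_false, stepA]
      exact ih s b hs hk2
    · have hc1 : PySem.Set.contains s ea.1 = false := by
        cases h : PySem.Set.contains s ea.1
        · rfl
        · exact absurd ((PySem.Set.contains_iff _ _).1 h) hmem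
      by_cases hact : PySem.Set.contains s ea.2 = true
      · -- fired
        have hfe : t.filter (fun x => !(PySem.Set.contains s x.1)) =
            t.filter (fun x => !(PySem.Set.contains (PySem.Set.add s ea.1) x.1)) := by
          apply List.filter_congr
          intro x hx
          have hne : x.1 ≠ ea.1 := fun h => hk1 ⟨x, hx, h⟩
          simp [PySem.Set.mem_add]
          exact fun _ => hne
        simp only [List.foldl_cons, List.filter_cons, hc1, Bool.not_false, Bool.true_and, hact,
          if_true, stepA, sweepB]
        rw [hfe]
        rw [ih (PySem.Set.add s ea.1) true (PySem.Set.nodup_add _ _ hs) hk2]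
        have hlen : (sweepB (PySem.Set.add s ea.1)
            (t.filter (fun x => !(PySem.Set.contains (PySem.Set.add s ea.1) x.1)))).2.length ≤
            (t.filter (fun x => !(PySem.Set.contains (PySem.Set.add s ea.1) x.1))).length :=
          sweepB_len _ _
        simp only [Prod.mk.injEq, List.length_cons]
        refine ⟨trivial, ?_⟩
        have hne2 : ((sweepB (PySem.Set.add s ea.1)
            (t.filter (fun x => !(PySem.Set.contains (PySem.Set.add s ea.1) x.1)))).2.length ==
            (t.filter (fun x => !(PySem.Set.contains (PySem.Set.add s ea.1) x.1))).length + 1) = false := by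
          simp only [beq_eq_false_iff_ne, ne_eq]
          omega
        rw [hne2]
        simp
      · -- kept
        have hac : PySem.Set.contains s ea.2 = false := by
          cases h : PySem.Set.contains s ea.2
          · rfl
          · exact absurd h hact
        simp only [List.foldl_cons, List.filter_cons, hc1, Bool.not_false, Bool.true_and, hac,
          Bool.false_eq_true, if_false, if_true, stepA]
        rw [ih s b hs hk2]
        simp only [sweepB, hac, Bool.false_eq_true, if_false, Prod.mk.injEq, List.length_cons]
        refine ⟨trivial, ?_⟩
        rw [pvBeqSucc]

-- the two loops agree whenever the fuel covers the worklist length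
theorem loop_eq (aliases : List (String × String)) (fuel : Nat) (cur : List String)
    (hs : cur.Nodup) (hk : (aliases.map Prod.fst).Nodup)
    (hf : (aliases.filter (fun ea => !(PySem.Set.contains cur ea.1))).length ≤ fuel) :
    resolveLoopA aliases fuel cur =
      resolveLoopB cur (aliases.filter (fun ea => !(PySem.Set.contains cur ea.1))) := by
  induction fuel generalizing cur with
  | zero =>
    have h0 : aliases.filter (fun ea => !(PySem.Set.contains cur ea.1)) = [] := by
      have := Nat.le_zero.1 hf
      exact List.eq_nil_of_length_eq_zero this
    rw [h0, resolveLoopB]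
    simp [resolveLoopA, sweepB]
  | succ n ih =>
    have hpk : ((aliases.filter (fun ea => !(PySem.Set.contains cur ea.1))).map Prod.fst).Nodup :=
      List.Nodup.sublist (List.Sublist.map Prod.fst List.filter_sublist) hk
    have hd : ∀ ea ∈ aliases.filter (fun ea => !(PySem.Set.contains cur ea.1)), ea.1 ∉ cur := by
      intro ea hea hmem
      have h2 := (List.mem_filter.1 hea).2
      rw [(PySem.Set.contains_iff _ _).2 hmem] at h2
      simp at h2
    obtain ⟨h1, h2, h3, h4⟩ :=
      sweepB_spec (aliases.filter (fun ea => !(PySem.Set.contains cur ea.1))) cur hs hpk hd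
    have honce : resolve_aliases_once_py cur aliases =
        ((sweepB cur (aliases.filter (fun ea => !(PySem.Set.contains cur ea.1)))).1,
         !((sweepB cur (aliases.filter (fun ea => !(PySem.Set.contains cur ea.1)))).2.length
            == (aliases.filter (fun ea => !(PySem.Set.contains cur ea.1))).length)) := by
      unfold resolve_aliases_once_py
      rw [PySem.Set.ofList_eq_self_of_nodup _ hs]
      rw [foldA_sweepB aliases cur false hs hk]
      simp
    by_cases hlen : (sweepB cur (aliases.filter (fun ea => !(PySem.Set.contains cur ea.1)))).2.length
        = (aliases.filter (fun ea => !(PySem.Set.contains cur ea.1))).length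
    · simp only [resolveLoopA, honce, hlen, beq_self_eq_true, Bool.not_true, Bool.false_eq_true,
        if_false]
      rw [resolveLoopB, dif_pos hlen]
    · have hbeq : ((sweepB cur (aliases.filter (fun ea => !(PySem.Set.contains cur ea.1)))).2.length
          == (aliases.filter (fun ea => !(PySem.Set.contains cur ea.1))).length) = false := by
        simp only [beq_eq_false_iff_ne, ne_eq]
        exact hlen
      have heq : aliases.filter (fun ea =>
          !(PySem.Set.contains (sweepB cur (aliases.filter (fun ea => !(PySem.Set.contains cur ea.1)))).1 ea.1)) =
          (sweepB cur (aliases.filter (fun ea => !(PySem.Set.contains cur ea.1)))).2 := by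
      -- aliases.filter (∉ r') = (aliases.filter (∉ cur)).filter (∉ r') since cur ⊆ r'
        rw [h3, List.filter_filter]
        apply List.filter_congr
        intro x hx
        cases hcr : PySem.Set.contains (sweepB cur (aliases.filter (fun ea => !(PySem.Set.contains cur ea.1)))).1 x.1
        · have hxs : x.1 ∉ cur := by
            intro hmem
            have := (PySem.Set.contains_iff _ _).2 (h1 x.1 hmem)
            rw [this] at hcr
            cases hcr
          simp
          exact hxs
        · simp
      have hflt : (sweepB cur (aliases.filter (fun ea => !(PySem.Set.contains cur ea.1)))).2.length ≤ n := by
        have hle := sweepB_len cur (aliases.filter (fun ea => !(PySem.Set.contains cur ea.1)))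
        omega
      simp only [resolveLoopA, honce, hbeq, Bool.not_false, if_true]
      rw [ih _ h4 (by rw [heq]; exact hflt)]
      rw [heq]
      conv_rhs => rw [resolveLoopB, dif_neg hlen]

-- ===== VERDICT (by name: the statement is the Claim_ definition above) =====
theorem resolve_aliases_py_spec : Claim_equal_resolve_aliases_py := by
  intro cols aliases _ hpre
  unfold Spec_resolve_aliases_py resolve_aliases_py resolve_aliases_py_alt
  apply loop_eq
  · exact PySem.Set.nodup_ofList cols
  · exact hpre
  · exact le_trans (List.length_filter_le _ _) (le_max_left _ _)
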